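-- pv_equiv track=rewrite | github.com/lucinamay/biosynfoni | cOnVERTure.py | entry_parser
-- ===== SOURCE A (Python) =====
-- def entry_parser(lines): #takes 19 secs for 59k entries
--     entries = []
--     current_entry = []
--     for line in lines:
--         current_entry.append(line)
--         if line == '$$$$':
--             entries.append(current_entry)
--             current_entry = []  #new entry
--     return entries
-- ===== SOURCE B (Python) =====
-- def entry_parser(lines):
--     # Index-then-slice: find the positions of the '$$$$' delimiters in one
--     # scan, then cut the line list into entries at those positions.  Lines
--     # after the last delimiter belong to no complete entry and are dropped.
--     lines = list(lines)
--     delims = [i for i, line in enumerate(lines) if line == '$$$$']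
--     entries = []
--     start = 0
--     for d in delims:
--         entries.append(lines[start:d + 1])
--         start = d + 1
--     return entries
-- ===== Notes on version B (the rewrite author's own statement) =====
-- stated objective: alternative
-- what changed: B replaces A's streaming scan with a growing current-entry buffer by an index-then-slice decomposition: one pass collects the positions of the '$$$$' delimiters, then each entry is produced as a slice lines[start:d+1] between consecutive delimiters.
import Mathlib
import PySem

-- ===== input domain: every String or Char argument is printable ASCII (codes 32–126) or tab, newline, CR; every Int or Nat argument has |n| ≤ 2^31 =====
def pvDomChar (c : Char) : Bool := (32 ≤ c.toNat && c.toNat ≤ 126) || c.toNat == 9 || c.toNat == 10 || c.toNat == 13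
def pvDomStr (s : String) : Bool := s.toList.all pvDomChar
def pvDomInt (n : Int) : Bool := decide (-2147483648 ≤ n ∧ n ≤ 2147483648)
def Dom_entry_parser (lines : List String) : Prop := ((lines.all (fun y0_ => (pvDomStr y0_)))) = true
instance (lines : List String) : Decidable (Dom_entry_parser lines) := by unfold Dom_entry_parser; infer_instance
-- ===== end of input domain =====

-- B replaces A's streaming scan with an index-then-slice decomposition (collect the
-- '$$$$' positions, then slice entries out between consecutive delimiters); same cost.

-- ===== PORT A =====
-- A's loop body: append line to the current entry; on '$$$$' flush it into entries.
def entryStepA (st : List (List String) × List String) (line : String) :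
    List (List String) × List String :=
  let cur := st.2 ++ [line]
  if line == "$$$$" then (st.1 ++ [cur], []) else (st.1, cur)

def entry_parser (lines : List String) : List (List String) :=
  (lines.foldl entryStepA ([], [])).1

-- ===== PORT B =====
-- delims = [i for i, line in enumerate(lines) if line == '$$$$']
def entryCuts (lines : List String) : List Int :=
  ((PySem.List.enumerate lines 0).filter (fun p => p.2 == "$$$$")).map (·.1)

-- B's loop body: entries.append(lines[start:d+1]); start = d+1
def entrySliceStep (lines : List String) (st : List (List String) × Int) (d : Int) :
    List (List String) × Int :=
  (st.1 ++ [PySem.List.slice lines (some st.2) (some (d + 1))], d + 1)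

def entry_parser_alt (lines : List String) : List (List String) :=
  ((entryCuts lines).foldl (entrySliceStep lines) ([], 0)).1

-- ===== PRECONDITION & SPEC =====
def Spec_entry_parser (lines : List String) (out : List (List String)) : Prop := out = entry_parser_alt lines
instance (lines : List String) (out : List (List String)) : Decidable (Spec_entry_parser lines out) := by unfold Spec_entry_parser; infer_instance

-- ===== CLAIM (what is proved, stated in full; the proofs are below) =====
def Claim_equal_entry_parser : Prop := ∀ (lines : List String), Dom_entry_parser lines → Spec_entry_parser lines (entry_parser lines)

-- ===== LEMMAS AND PROOFS =====

-- Factor the accumulated entries out of B's fold.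
theorem foldB_factor (lines : List String) (ds : List Int) (es : List (List String)) (s : Int) :
    (ds.foldl (entrySliceStep lines) (es, s)).1
      = es ++ (ds.foldl (entrySliceStep lines) ([], s)).1 := by
  induction ds generalizing es s with
  | nil => simp
  | cons d ds ih =>
    simp only [List.foldl_cons, entrySliceStep, List.nil_append]
    rw [ih, ih (es := [PySem.List.slice lines (some s) (some (d + 1))])]
    simp

-- Shift lemma: folding the (+1)-shifted cuts over (l :: t) from start s+1
-- equals folding the cuts over t from start s (natural starts and cuts).
theorem foldB_shift (l : String) (t : List String) (ds : List Int)
    (hds : ∀ d ∈ ds, ∃ n : Nat, d = (n : Int)) (s : Nat) :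
    ((ds.map (· + 1)).foldl (entrySliceStep (l :: t)) ([], (s : Int) + 1)).1
      = (ds.foldl (entrySliceStep t) ([], (s : Int))).1 := by
  induction ds generalizing s with
  | nil => rfl
  | cons d ds ih =>
    obtain ⟨n, rfl⟩ := hds d (List.mem_cons_self ..)
    simp only [List.map_cons, List.foldl_cons, entrySliceStep]
    rw [foldB_factor, foldB_factor t]
    have h1 : ((n : Int) + 1 + 1) = ((n + 1 : Nat) : Int) + 1 := by push_cast; ring
    have h2 : ((n : Int) + 1) = ((n + 1 : Nat) : Int) := by push_cast; ring
    rw [h1, h2, ih (fun d hd => hds d (List.mem_cons_of_mem _ hd)) (s := n + 1)]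
    congr 2
    have e1 : (((n + 1 : Nat) : Int) + 1) = ((n + 2 : Nat) : Int) := by push_cast; ring
    have e2 : ((s : Int) + 1) = ((s + 1 : Nat) : Int) := by push_cast; ring
    rw [e2, e1, PySem.List.slice_natCast, PySem.List.slice_natCast, List.drop_succ_cons]
    congr 2
    omega

-- Cuts of a cons: shift, prepending 0 when the head is a delimiter.
theorem cutsShift (xs : List String) (s : Int) :
    (((PySem.List.enumerate xs (s + 1)).filter (fun p => p.2 == "$$$$")).map (·.1))
      = ((((PySem.List.enumerate xs s).filter (fun p => p.2 == "$$$$")).map (·.1)).map (· + 1)) := by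
  induction xs generalizing s with
  | nil => rfl
  | cons x xs ih =>
    rw [PySem.List.enumerate_cons, PySem.List.enumerate_cons]
    by_cases hx : x == "$$$$"
    · simp [hx, ih]
    · simp [hx, ih]

theorem entryCuts_cons (l : String) (t : List String) :
    entryCuts (l :: t)
      = (if l == "$$$$" then [(0 : Int)] else []) ++ (entryCuts t).map (· + 1) := by
  unfold entryCuts
  rw [PySem.List.enumerate_cons]
  by_cases hl : l == "$$$$" <;>
    simp only [List.filter_cons, hl, if_pos, List.map_cons] <;>
    · have := cutsShift t 0
      simp only [zero_add] at this
      simp [this]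

theorem entryCuts_nat (lines : List String) : ∀ d ∈ entryCuts lines, ∃ n : Nat, d = (n : Int) := by
  intro d hd
  unfold entryCuts at hd
  simp only [List.mem_map, List.mem_filter] at hd
  obtain ⟨p, ⟨hp, _⟩, rfl⟩ := hd
  rw [PySem.List.mem_enumerate_iff] at hp
  obtain ⟨k, hk, rfl⟩ := hp
  exact ⟨k, by simp⟩

-- B's cons characterization.
theorem altB_cons (l : String) (t : List String) :
    entry_parser_alt (l :: t)
      = if l == "$$$$" then [l] :: entry_parser_alt t
        else match entry_parser_alt t with
             | [] => []
             | h :: r => (l :: h) :: r := by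
  unfold entry_parser_alt
  rw [entryCuts_cons]
  by_cases hl : l == "$$$$"
  · simp only [hl, if_pos, List.singleton_append, List.foldl_cons]
    simp only [entrySliceStep]
    rw [foldB_factor]
    have hsh := foldB_shift l t (entryCuts t) (entryCuts_nat t) 0
    norm_num at hsh ⊢
    rw [hsh]
    have : PySem.List.slice (l :: t) (some ((0:Nat) : Int)) (some ((1:Nat) : Int)) = [l] := by
      rw [PySem.List.slice_natCast]; simp
    simpa using this
  · simp only [hl, if_neg, Bool.false_eq_true, not_false_iff, List.nil_append]
    rcases hc : entryCuts t with _ | ⟨d, ds⟩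
    · simp
    · obtain ⟨n, rfl⟩ := entryCuts_nat t d (by rw [hc]; exact List.mem_cons_self ..)
      have hds : ∀ x ∈ ds, ∃ m : Nat, x = (m : Int) := fun x hx =>
        entryCuts_nat t x (by rw [hc]; exact List.mem_cons_of_mem _ hx)
      simp only [List.map_cons, List.foldl_cons, entrySliceStep]
      rw [foldB_factor, foldB_factor t]
      have h1 : ((n : Int) + 1 + 1) = ((n + 1 : Nat) : Int) + 1 := by push_cast; ring
      have h2 : ((n : Int) + 1) = ((n + 1 : Nat) : Int) := by push_cast; ring
      rw [h1, h2, foldB_shift l t ds hds (n + 1)]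
      have hslice1 : PySem.List.slice (l :: t) (some (0 : Int)) (some (((n + 1 : Nat) : Int) + 1))
          = l :: PySem.List.slice t (some (0 : Int)) (some ((n + 1 : Nat) : Int)) := by
        have e0 : (0 : Int) = ((0 : Nat) : Int) := rfl
        have e1 : (((n + 1 : Nat) : Int) + 1) = ((n + 2 : Nat) : Int) := by push_cast; ring
        rw [e0, e1, PySem.List.slice_natCast, PySem.List.slice_natCast]
        simp [List.take_succ_cons]
      rw [hslice1]
      simp

-- A's fold in terms of B: the open buffer a is prepended into B's first entry.
theorem foldA_main (ls : List String) (es : List (List String)) (a : List String) :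
    (ls.foldl entryStepA (es, a)).1
      = es ++ (match entry_parser_alt ls with
               | [] => []
               | h :: r => (a ++ h) :: r) := by
  induction ls generalizing es a with
  | nil =>
    have : entry_parser_alt [] = [] := rfl
    simp [this]
  | cons l t ih =>
    simp only [List.foldl_cons, entryStepA]
    rw [altB_cons]
    by_cases hl : l == "$$$$"
    · simp only [hl, if_pos, ih]
      rcases entry_parser_alt t with _ | ⟨h, r⟩ <;> simp
    · simp only [hl, if_neg, Bool.false_eq_true, not_false_iff, ih]
      rcases entry_parser_alt t with _ | ⟨h, r⟩ <;> simp

-- ===== VERDICT (by name: the statement is the Claim_ definition above) =====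
theorem entry_parser_spec : Claim_equal_entry_parser := by
  intro lines _
  unfold Spec_entry_parser entry_parser
  rw [foldA_main]
  rcases entry_parser_alt lines with _ | ⟨h, r⟩ <;> simp
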